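-- pv_equiv track=rewrite | github.com/yutaOKKOTSU00/python-for-EveryOne | graph_theories/graph_propertises.py | Injectivite
-- ===== SOURCE A (Python) =====
-- def Injectivite(matrice, sommets):  # au plus un 1 par colonne
--     T = 1
--
--     for i in range(sommets):
--         colone = 0
--         for j in range(sommets):
--             colone += matrice[j][i]
--         if colone > 1:
--             T = 0
--
--     return T
-- ===== SOURCE B (Python) =====
-- def Injectivite(matrice, sommets):  # au plus un 1 par colonne
--     if sommets <= 0:
--         return 1
--     total = matrice[0][:sommets]
--     for row in matrice[1:sommets]:
--         total = [a + b for a, b in zip(total, row)]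
--     return 1 if max(total) <= 1 else 0
-- ===== Notes on version B (the rewrite author's own statement) =====
-- stated objective: alternative
-- what changed: B treats the first sommets rows as vectors: it slices row 0, reduces the remaining rows by elementwise zip-addition into one vector, and decides the answer from max(total), instead of A's per-column index loops with a flag.
import Mathlib
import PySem

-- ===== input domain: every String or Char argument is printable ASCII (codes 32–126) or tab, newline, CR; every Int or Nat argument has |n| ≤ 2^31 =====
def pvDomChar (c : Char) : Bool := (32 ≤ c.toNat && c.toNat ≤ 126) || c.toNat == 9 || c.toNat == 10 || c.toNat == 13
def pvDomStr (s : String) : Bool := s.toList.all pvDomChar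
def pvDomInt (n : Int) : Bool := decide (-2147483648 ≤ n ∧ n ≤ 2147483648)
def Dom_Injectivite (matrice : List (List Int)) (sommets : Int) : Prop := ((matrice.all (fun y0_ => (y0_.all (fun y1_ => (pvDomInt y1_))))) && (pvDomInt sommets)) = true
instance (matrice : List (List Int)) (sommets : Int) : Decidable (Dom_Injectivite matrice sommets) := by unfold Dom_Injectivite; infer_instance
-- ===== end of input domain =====

-- B reduces the first sommets rows by elementwise zip-addition into one vector and decides
-- the answer from its maximum, instead of A's per-column index loops with a flag (alternative).

-- ===== PORT A =====
def Injectivite (matrice : List (List Int)) (sommets : Int) : Int :=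
  (PySem.List.pyRange 0 sommets 1).foldl
    (fun T i =>
      let colone :=
        (PySem.List.pyRange 0 sommets 1).foldl
          (fun c j => c + PySem.List.pyGetD (PySem.List.pyGetD matrice j []) i 0) 0
      if colone > 1 then 0 else T) 1

-- ===== PORT B =====
def Injectivite_alt (matrice : List (List Int)) (sommets : Int) : Int :=
  if sommets ≤ 0 then 1
  else
    -- matrice[0]: Python raises IndexError on an empty matrice; that input is outside Pre_
    let total :=
      (PySem.List.slice matrice (some 1) (some sommets)).foldl
        (fun t row => (t.zip row).map (fun p => p.1 + p.2))
        (PySem.List.slice (PySem.List.pyGetD matrice 0 []) none (some sommets))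
    match PySem.List.max? total (fun x => x) with
    | some m => if m ≤ 1 then 1 else 0
    | none => 0   -- max([]) raises ValueError in Python; unreachable under Pre_

-- ===== PRECONDITION & SPEC =====
-- Pre_ excludes exactly the inputs where Python A raises IndexError: sommets rows must exist
-- and each of the first sommets rows must have at least sommets entries.
def Pre_Injectivite (matrice : List (List Int)) (sommets : Int) : Prop :=
  sommets ≤ (matrice.length : Int) ∧
  ∀ row ∈ matrice.take sommets.toNat, sommets ≤ (row.length : Int)
instance (matrice : List (List Int)) (sommets : Int) : Decidable (Pre_Injectivite matrice sommets) := by unfold Pre_Injectivite; infer_instance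
def pvWitness_Injectivite : List (List Int) × Int := ([[1, 0], [0, 1]], 2)

def Spec_Injectivite (matrice : List (List Int)) (sommets : Int) (out : Int) : Prop := out = Injectivite_alt matrice sommets
instance (matrice : List (List Int)) (sommets : Int) (out : Int) : Decidable (Spec_Injectivite matrice sommets out) := by unfold Spec_Injectivite; infer_instance

-- ===== CLAIM (what is proved, stated in full; the proofs are below) =====
def Claim_equal_Injectivite : Prop := ∀ (matrice : List (List Int)) (sommets : Int), Dom_Injectivite matrice sommets → Pre_Injectivite matrice sommets → Spec_Injectivite matrice sommets (Injectivite matrice sommets)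

-- ===== LEMMAS AND PROOFS =====

-- A's flag loop: T ends 0 iff some index satisfies the test.
theorem pv_flag_foldl {a : Type} (C : a → Prop) [DecidablePred C] (l : List a) (t : Int) :
    l.foldl (fun T i => if C i then (0 : Int) else T) t
      = if l.any (fun i => decide (C i)) then 0 else t := by
  induction l generalizing t with
  | nil => simp
  | cons x xs ih => by_cases h : C x <;> simp [List.foldl_cons, ih, h]

-- A's inner sum loop is a sum over the row indices.
theorem pv_sum_foldl {a : Type} (f : a → Int) (l : List a) (c : Int) :
    l.foldl (fun c j => c + f j) c = c + (l.map f).sum := by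
  induction l generalizing c with
  | nil => simp
  | cons x xs ih => simp [List.foldl_cons, ih]; ring

-- B's zip-add reduction: length stays n and slot i accumulates the column-i entries.
theorem pv_zipfold (rs : List (List Int)) (n : Nat) :
    ∀ t : List Int, t.length = n → (∀ r ∈ rs, n ≤ r.length) →
    (rs.foldl (fun t row => (t.zip row).map (fun p : Int × Int => p.1 + p.2)) t).length = n ∧
    ∀ i : Nat, i < n →
      (rs.foldl (fun t row => (t.zip row).map (fun p : Int × Int => p.1 + p.2)) t).getD i 0
        = t.getD i 0 + (rs.map (fun r => r.getD i 0)).sum := by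
  induction rs with
  | nil => intro t ht _; exact ⟨ht, fun i _ => by simp⟩
  | cons r rs ih =>
      intro t ht hr
      have hrl : n ≤ r.length := hr r (List.mem_cons_self)
      have hlen : ((t.zip r).map (fun p : Int × Int => p.1 + p.2)).length = n := by
        simp [List.length_zip, ht]; omega
      obtain ⟨ih1, ih2⟩ := ih _ hlen (fun r' h' => hr r' (List.mem_cons_of_mem _ h'))
      refine ⟨ih1, fun i hi => ?_⟩
      rw [List.foldl_cons, ih2 i hi]
      have hgd : ((t.zip r).map (fun p : Int × Int => p.1 + p.2)).getD i 0
          = t.getD i 0 + r.getD i 0 := by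
        have hiz : i < (t.zip r).length := by simp [List.length_zip, ht]; omega
        rw [List.getD_eq_getElem?_getD, List.getElem?_map,
            List.getElem?_eq_getElem hiz, List.getElem_zip]
        simp only [Option.map_some, Option.getD_some]
        rw [List.getD_eq_getElem?_getD, List.getElem?_eq_getElem (by omega),
            List.getD_eq_getElem?_getD, List.getElem?_eq_getElem (by omega)]
        simp
      simp only [List.map_cons, List.sum_cons] at *
      rw [hgd]; ring
  
-- The first n rows as a range of getD lookups.
theorem pv_take_map_range (f : List Int → Int) (xs : List (List Int)) (n : Nat)
    (h : n ≤ xs.length) :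
    (xs.take n).map f = (List.range n).map (fun j => f (xs.getD j [])) := by
  apply List.ext_getElem
  · simp; omega
  · intro i h1 h2
    simp only [List.getElem_map, List.getElem_take, List.getElem_range]
    have hi : i < n := by simp at h1; exact h1.1
    rw [List.getD_eq_getElem?_getD, List.getElem?_eq_getElem (by omega)]
    simp

theorem Injectivite_eq_alt (matrice : List (List Int)) (sommets : Int)
    (hpre : Pre_Injectivite matrice sommets) :
    Injectivite matrice sommets = Injectivite_alt matrice sommets := by
  obtain ⟨h1, h2⟩ := hpre
  unfold Injectivite Injectivite_alt
  by_cases hs : sommets ≤ 0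
  · rw [if_pos hs, PySem.List.pyRange_one_eq_nil (by omega)]; rfl
  rw [if_neg hs]
  set n := sommets.toNat with hn
  have hns : (n : Int) = sommets := by omega
  have hnl : n ≤ matrice.length := by omega
  have hpos : 0 < n := by omega
  -- A's side as a condition over columns
  have hrange : PySem.List.pyRange 0 sommets 1
      = (List.range n).map (fun k : Nat => (k : Int)) := by
    rw [PySem.List.pyRange_one]; simp [hn]
  rw [hrange]
  simp only [List.foldl_map]
  rw [pv_flag_foldl (fun i : Nat =>
    ((List.range n).foldl
      (fun (c : Int) (j : Nat) =>
        c + PySem.List.pyGetD (PySem.List.pyGetD matrice (j : Int) []) (i : Int) 0) 0) > 1)]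
  -- B's side: the slices as take/drop
  have hslice1 : PySem.List.slice matrice (some 1) (some sommets)
      = (matrice.drop 1).take (n - 1) := by
    rw [← hns, show ((1 : Int)) = ((1 : Nat) : Int) from rfl, PySem.List.slice_natCast]
  have hrow0 : PySem.List.pyGetD matrice 0 [] = matrice.getD 0 [] :=
    PySem.List.pyGetD_zero matrice []
  have hslice0 : PySem.List.slice (matrice.getD 0 []) none (some sommets)
      = (matrice.getD 0 []).take n := by
    rw [← hns, PySem.List.slice_to_natCast]
  rw [hslice1, hrow0, hslice0]
  -- facts about rows
  have hrow_mem : ∀ j : Nat, j < n → matrice.getD j [] ∈ matrice.take n := by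
    intro j hj
    rw [List.getD_eq_getElem?_getD, List.getElem?_eq_getElem (by omega)]
    simp only [Option.getD_some]
    exact List.mem_take_iff_getElem.mpr ⟨j, by omega, by simp⟩
  have hrow_len : ∀ j : Nat, j < n → n ≤ (matrice.getD j []).length := by
    intro j hj
    have := h2 _ (hrow_mem j hj); omega
  have ht0len : ((matrice.getD 0 []).take n).length = n := by
    simp only [List.length_take]
    have := hrow_len 0 hpos; omega
  have hrs_len : ∀ r ∈ (matrice.drop 1).take (n - 1), n ≤ r.length := by
    intro r hr
    rw [← List.drop_take] at hr
    have := h2 r (List.mem_of_mem_drop hr)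
    omega
  obtain ⟨hTlen, hTget⟩ := pv_zipfold ((matrice.drop 1).take (n - 1)) n
      ((matrice.getD 0 []).take n) ht0len hrs_len
  set total := ((matrice.drop 1).take (n - 1)).foldl
      (fun t row => (t.zip row).map (fun p : Int × Int => p.1 + p.2))
      ((matrice.getD 0 []).take n) with htotal
  -- each slot of total is the column sum over range n
  have hcol : ∀ i : Nat, i < n →
      total.getD i 0
        = ((List.range n).map (fun j : Nat =>
            PySem.List.pyGetD (PySem.List.pyGetD matrice (j : Int) []) (i : Int) 0)).sum := by
    intro i hi
    rw [hTget i hi]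
    have hgetfix : ∀ j : Nat, j < n →
        PySem.List.pyGetD (PySem.List.pyGetD matrice (j : Int) []) (i : Int) 0
          = (matrice.getD j []).getD i 0 := by
      intro j hj
      rw [PySem.List.pyGetD_natCast, PySem.List.pyGetD_natCast]
    have hmaps : (List.range n).map (fun j : Nat =>
          PySem.List.pyGetD (PySem.List.pyGetD matrice (j : Int) []) (i : Int) 0)
        = (List.range n).map (fun j : Nat => (matrice.getD j []).getD i 0) :=
      List.map_congr_left (fun j hj => hgetfix j (by simpa using hj))
    rw [hmaps, ← pv_take_map_range (fun r => r.getD i 0) matrice n hnl]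
    have hsplit : matrice.take n = matrice.getD 0 [] :: (matrice.drop 1).take (n - 1) := by
      cases matrice with
      | nil => simp at hnl; omega
      | cons r0 rest =>
          rw [show n = (n - 1) + 1 from by omega]
          simp [List.take_succ_cons]
    rw [hsplit]
    simp only [List.map_cons, List.sum_cons]
    have ht0 : ((matrice.getD 0 []).take n).getD i 0 = (matrice.getD 0 []).getD i 0 := by
      simp [List.getD_eq_getElem?_getD, hi]
    rw [ht0]
  -- the max of total and the any over columns agree
  have htotne : total ≠ [] := by
    intro h; rw [h] at hTlen; simp at hTlen; omega
  obtain ⟨m, hm⟩ : ∃ m, PySem.List.max? total (fun x => x) = some m := by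
    cases hq : PySem.List.max? total (fun x => x) with
    | none => exact absurd ((PySem.List.max?_eq_none_iff _ _).mp hq) htotne
    | some m => exact ⟨m, rfl⟩
  rw [hm]
  have hmem : m ∈ total := PySem.List.max?_mem hm
  have hmax : ∀ y ∈ total, y ≤ m := fun y hy => PySem.List.max?_isMax hm y hy
  -- condition A fires iff some slot of total exceeds 1 iff m > 1
  have hiff : ((List.range n).any (fun i : Nat =>
        decide (((List.range n).foldl
          (fun (c : Int) (j : Nat) =>
            c + PySem.List.pyGetD (PySem.List.pyGetD matrice (j : Int) []) (i : Int) 0) 0) > 1)))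
      = decide (1 < m) := by
    apply Bool.eq_iff_iff.mpr
    simp only [List.any_eq_true, List.mem_range, decide_eq_true_eq]
    constructor
    · rintro ⟨i, hi, hgt⟩
      rw [pv_sum_foldl (fun j : Nat =>
            PySem.List.pyGetD (PySem.List.pyGetD matrice (j : Int) []) (i : Int) 0)
            (List.range n) 0, zero_add, ← hcol i hi] at hgt
      have : total.getD i 0 ≤ m := by
        apply hmax
        rw [List.getD_eq_getElem?_getD, List.getElem?_eq_getElem (by omega)]
        exact List.getElem_mem (by omega)
      omega
    · intro hgt
      obtain ⟨i, hi, hie⟩ := List.mem_iff_getElem.mp hmem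
      refine ⟨i, by omega, ?_⟩
      rw [pv_sum_foldl (fun j : Nat =>
            PySem.List.pyGetD (PySem.List.pyGetD matrice (j : Int) []) (i : Int) 0)
            (List.range n) 0, zero_add, ← hcol i (by omega)]
      rw [List.getD_eq_getElem?_getD, List.getElem?_eq_getElem hi, Option.getD_some, hie]
      exact hgt
  rw [hiff]
  by_cases hm1 : m ≤ 1
  · simp [hm1, show ¬ (1:Int) < m from by omega]
  · simp [hm1, show (1:Int) < m from by omega]

-- ===== VERDICT (by name: the statement is the Claim_ definition above) =====
theorem Injectivite_spec : Claim_equal_Injectivite := by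
  intro matrice sommets _ hpre
  unfold Spec_Injectivite
  exact Injectivite_eq_alt matrice sommets hpre
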